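-- pv_equiv track=rewrite | github.com/scijava/jgo | src/jgo/cli/parser.py | _parse_remaining
-- ===== SOURCE A (Python) =====
-- def _parse_remaining(remaining):
--     """
--     Parse remaining args for JVM and app arguments.
--
--     Format: [-- JVM_ARGS] [-- APP_ARGS]
--
--     Returns:
--         Tuple of (jvm_args, app_args)
--     """
--     if not remaining:
--         return [], []
--
--     # Convert to list
--     remaining = list(remaining)
--
--     # Find -- separators
--     separators = [i for i, arg in enumerate(remaining) if arg == "--"]
--
--     if not separators:
--         # No separators - everything is app args
--         return [], remaining
--
--     if len(separators) == 1:
--         # One separator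
--         sep_idx = separators[0]
--         jvm_args = remaining[:sep_idx]
--         app_args = remaining[sep_idx + 1 :]
--         return jvm_args, app_args
--
--     # Two or more separators
--     first_sep = separators[0]
--     second_sep = separators[1]
--     jvm_args = remaining[:first_sep]
--     app_args = remaining[second_sep + 1 :]
--     return jvm_args, app_args
-- ===== SOURCE B (Python) =====
-- def _parse_remaining(remaining):
--     """Single forward pass: count '--' separators and fill section buffers."""
--     seen = 0
--     pre, mid, app = [], [], []
--     for tok in remaining:
--         if seen >= 2:
--             app.append(tok)
--         elif tok == "--":
--             seen += 1
--         elif seen == 0: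
--             pre.append(tok)
--         else:
--             mid.append(tok)
--     if seen == 0:
--         return [], pre
--     if seen == 1:
--         return pre, mid
--     return pre, app
-- ===== Notes on version B (the rewrite author's own statement) =====
-- stated objective: alternative
-- what changed: Replaced the index-list + slicing approach (enumerate all '--' positions, then slice around the first/second) by a single forward pass with a separator counter and three section buffers.
import Mathlib
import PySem

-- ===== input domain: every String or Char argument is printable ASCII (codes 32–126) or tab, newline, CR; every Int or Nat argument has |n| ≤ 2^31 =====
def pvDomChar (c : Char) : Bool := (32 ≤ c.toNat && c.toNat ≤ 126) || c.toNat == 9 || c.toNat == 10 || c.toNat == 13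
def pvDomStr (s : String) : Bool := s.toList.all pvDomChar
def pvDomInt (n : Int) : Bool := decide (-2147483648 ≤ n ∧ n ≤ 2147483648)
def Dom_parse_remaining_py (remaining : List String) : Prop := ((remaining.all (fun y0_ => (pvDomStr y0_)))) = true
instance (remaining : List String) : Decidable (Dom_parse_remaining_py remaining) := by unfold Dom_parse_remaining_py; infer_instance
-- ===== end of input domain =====

-- B replaces A's separator-index list + slicing by one forward pass with a counter and section buffers (alternative decomposition, same cost).

-- ===== PORT A =====
-- separators = [i for i, arg in enumerate(remaining) if arg == "--"]
def pvSeps (remaining : List String) : List Int :=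
  ((PySem.List.enumerate remaining 0).filter (fun p => p.2 == "--")).map (·.1)

def parse_remaining_py (remaining : List String) : List String × List String :=
  if remaining = [] then ([], [])
  else
    let separators := pvSeps remaining
    if separators = [] then ([], remaining)
    else if separators.length = 1 then
      let sep_idx := separators.getD 0 0
      (PySem.List.slice remaining none (some sep_idx),
       PySem.List.slice remaining (some (sep_idx + 1)) none)
    else
      let first_sep := separators.getD 0 0
      let second_sep := separators.getD 1 0
      (PySem.List.slice remaining none (some first_sep),
       PySem.List.slice remaining (some (second_sep + 1)) none)

-- ===== PORT B =====
def pvStep (st : Nat × List String × List String × List String) (tok : String) :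
    Nat × List String × List String × List String :=
  let (seen, pre, mid, app) := st
  if 2 ≤ seen then (seen, pre, mid, app ++ [tok])
  else if tok = "--" then (seen + 1, pre, mid, app)
  else if seen = 0 then (seen, pre ++ [tok], mid, app)
  else (seen, pre, mid ++ [tok], app)

def parse_remaining_py_alt (remaining : List String) : List String × List String :=
  let st := remaining.foldl pvStep (0, [], [], [])
  let (seen, pre, mid, app) := st
  if seen = 0 then ([], pre)
  else if seen = 1 then (pre, mid)
  else (pre, app)

-- ===== PRECONDITION & SPEC =====
def Spec_parse_remaining_py (remaining : List String) (out : List String × List String) : Prop := out = parse_remaining_py_alt remaining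
instance (remaining : List String) (out : List String × List String) : Decidable (Spec_parse_remaining_py remaining out) := by unfold Spec_parse_remaining_py; infer_instance

-- ===== CLAIM (what is proved, stated in full; the proofs are below) =====
def Claim_equal_parse_remaining_py : Prop := ∀ (remaining : List String), Dom_parse_remaining_py remaining → Spec_parse_remaining_py remaining (parse_remaining_py remaining)

-- ===== LEMMAS AND PROOFS =====

-- generalized separator list (arbitrary enumerate start)
def pvSepsFrom (l : List String) (s : Int) : List Int :=
  ((PySem.List.enumerate l s).filter (fun p => p.2 == "--")).map (·.1)

theorem pvSepsFrom_zero (l : List String) : pvSeps l = pvSepsFrom l 0 := rfl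

theorem pvSepsFrom_no_sep (l : List String) (h : "--" ∉ l) (s : Int) : pvSepsFrom l s = [] := by
  induction l generalizing s with
  | nil => rfl
  | cons x xs ih =>
    simp only [pvSepsFrom, PySem.List.enumerate_cons, List.filter_cons] at *
    have hx : x ≠ "--" := fun hx => h (by simp [hx])
    simp [hx, ih (fun hm => h (List.mem_cons_of_mem _ hm))]

theorem pvSepsFrom_split (xs ys : List String) (h : "--" ∉ xs) (s : Int) :
    pvSepsFrom (xs ++ "--" :: ys) s = (s + xs.length) :: pvSepsFrom ys (s + xs.length + 1) := by
  induction xs generalizing s with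
  | nil => simp [pvSepsFrom, PySem.List.enumerate_cons]
  | cons x xs ih =>
    have hx : x ≠ "--" := fun hx => h (by simp [hx])
    have ih' := ih (fun hm => h (List.mem_cons_of_mem _ hm)) (s + 1)
    simp only [pvSepsFrom, PySem.List.enumerate_cons, List.cons_append, List.filter_cons,
      beq_iff_eq, if_neg hx] at *
    rw [ih']
    have hlen : (((x :: xs).length : Nat) : Int) = (xs.length : Int) + 1 := by simp
    rw [hlen]
    ring_nf

-- B's fold on a separator-free chunk, per state
theorem pvFold_seen0 (l : List String) (h : "--" ∉ l) (pre mid app : List String) :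
    l.foldl pvStep (0, pre, mid, app) = (0, pre ++ l, mid, app) := by
  induction l generalizing pre with
  | nil => simp
  | cons x xs ih =>
    have hx : x ≠ "--" := fun hx => h (by simp [hx])
    have hstep : pvStep (0, pre, mid, app) x = (0, pre ++ [x], mid, app) := by
      simp [pvStep, hx]
    rw [List.foldl_cons, hstep, ih (fun hm => h (List.mem_cons_of_mem _ hm))]
    simp

theorem pvFold_seen1 (l : List String) (h : "--" ∉ l) (pre mid app : List String) :
    l.foldl pvStep (1, pre, mid, app) = (1, pre, mid ++ l, app) := by
  induction l generalizing mid with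
  | nil => simp
  | cons x xs ih =>
    have hx : x ≠ "--" := fun hx => h (by simp [hx])
    have hstep : pvStep (1, pre, mid, app) x = (1, pre, mid ++ [x], app) := by
      simp [pvStep, hx]
    rw [List.foldl_cons, hstep, ih (fun hm => h (List.mem_cons_of_mem _ hm))]
    simp

theorem pvFold_seen2 (l : List String) (pre mid app : List String) :
    l.foldl pvStep (2, pre, mid, app) = (2, pre, mid, app ++ l) := by
  induction l generalizing app with
  | nil => simp
  | cons x xs ih =>
    have hstep : pvStep (2, pre, mid, app) x = (2, pre, mid, app ++ [x]) := by
      simp [pvStep]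
    rw [List.foldl_cons, hstep, ih]
    simp

-- first-occurrence decomposition
theorem pvDecomp (l : List String) :
    "--" ∉ l ∨ ∃ xs ys, l = xs ++ "--" :: ys ∧ "--" ∉ xs := by
  induction l with
  | nil => exact Or.inl (by simp)
  | cons x xs ih =>
    by_cases hx : x = "--"
    · exact Or.inr ⟨[], xs, by simp [hx], by simp⟩
    · rcases ih with h | ⟨as, bs, rfl, ha⟩
      · exact Or.inl (by simp [h, eq_comm, hx])
      · exact Or.inr ⟨x :: as, bs, by simp, by simp [ha, eq_comm, hx]⟩

theorem pvB_no_sep (l : List String) (h : "--" ∉ l) :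
    parse_remaining_py_alt l = ([], l) := by
  simp [parse_remaining_py_alt, pvFold_seen0 l h]

theorem pvB_one_sep (xs ys : List String) (hx : "--" ∉ xs) (hy : "--" ∉ ys) :
    parse_remaining_py_alt (xs ++ "--" :: ys) = (xs, ys) := by
  have h1 : List.foldl pvStep (0, ([] : List String), [], []) xs = (0, xs, [], []) := by
    simpa using pvFold_seen0 xs hx [] [] []
  have h2 : pvStep (0, xs, [], []) "--" = (1, xs, [], []) := by simp [pvStep]
  have h3 : List.foldl pvStep (1, xs, [], []) ys = (1, xs, ys, []) := by
    simpa using pvFold_seen1 ys hy xs [] []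
  have hfold : (xs ++ "--" :: ys).foldl pvStep (0, [], [], []) = (1, xs, ys, []) := by
    simp only [List.foldl_append, List.foldl_cons, h1, h2, h3]
  simp only [parse_remaining_py_alt]
  rw [hfold]
  simp

theorem pvB_two_sep (xs ys zs : List String) (hx : "--" ∉ xs) (hy : "--" ∉ ys) :
    parse_remaining_py_alt (xs ++ "--" :: ys ++ "--" :: zs) = (xs, zs) := by
  have h1 : List.foldl pvStep (0, ([] : List String), [], []) xs = (0, xs, [], []) := by
    simpa using pvFold_seen0 xs hx [] [] []
  have h2 : pvStep (0, xs, [], []) "--" = (1, xs, [], []) := by simp [pvStep]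
  have h3 : List.foldl pvStep (1, xs, [], []) ys = (1, xs, ys, []) := by
    simpa using pvFold_seen1 ys hy xs [] []
  have h4 : pvStep (1, xs, ys, []) "--" = (2, xs, ys, []) := by simp [pvStep]
  have h5 : List.foldl pvStep (2, xs, ys, []) zs = (2, xs, ys, zs) := by
    simpa using pvFold_seen2 zs xs ys []
  have hfold : (xs ++ "--" :: ys ++ "--" :: zs).foldl pvStep (0, [], [], []) = (2, xs, ys, zs) := by
    simp only [List.foldl_append, List.foldl_cons, h1, h2, h3, h4, h5]
  simp only [parse_remaining_py_alt]
  rw [hfold]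
  simp

-- A on each shape
theorem pvA_no_sep (l : List String) (h : "--" ∉ l) :
    parse_remaining_py l = ([], l) := by
  rcases l with _ | ⟨x, xs⟩
  · rfl
  · simp [parse_remaining_py, pvSepsFrom_zero, pvSepsFrom_no_sep _ h]

theorem pvA_one_sep (xs ys : List String) (hx : "--" ∉ xs) (hy : "--" ∉ ys) :
    parse_remaining_py (xs ++ "--" :: ys) = (xs, ys) := by
  have hsep : pvSeps (xs ++ "--" :: ys) = [(xs.length : Int)] := by
    rw [pvSepsFrom_zero, pvSepsFrom_split xs ys hx 0, pvSepsFrom_no_sep _ hy]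
    simp
  have hslice1 : PySem.List.slice (xs ++ "--" :: ys) none (some (xs.length : Int)) = xs := by
    rw [PySem.List.slice_to_natCast]
    simp
  have hslice2 : PySem.List.slice (xs ++ "--" :: ys) (some ((xs.length : Int) + 1)) none = ys := by
    have hc : ((xs.length : Int) + 1) = ((xs.length + 1 : Nat) : Int) := by push_cast; ring
    rw [hc, PySem.List.slice_from_natCast,
      show xs ++ "--" :: ys = (xs ++ ["--"]) ++ ys by simp,
      show xs.length + 1 = (xs ++ ["--"]).length by simp, List.drop_left]
  simp [parse_remaining_py, hsep, hslice1, hslice2]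

theorem pvA_two_sep (xs ys zs : List String) (hx : "--" ∉ xs) (hy : "--" ∉ ys) :
    parse_remaining_py (xs ++ "--" :: ys ++ "--" :: zs) = (xs, zs) := by
  have hsep : pvSeps (xs ++ "--" :: ys ++ "--" :: zs) =
      (xs.length : Int) :: ((xs.length : Int) + ys.length + 1) ::
        pvSepsFrom zs ((xs.length : Int) + ys.length + 2) := by
    rw [pvSepsFrom_zero, List.append_assoc, List.cons_append,
      pvSepsFrom_split xs _ hx 0, pvSepsFrom_split ys zs hy]
    ring_nf
  have hslice1 : PySem.List.slice (xs ++ "--" :: ys ++ "--" :: zs) none (some (xs.length : Int)) = xs := by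
    rw [PySem.List.slice_to_natCast, List.append_assoc, List.cons_append]
    simp
  have hslice2 : PySem.List.slice (xs ++ "--" :: ys ++ "--" :: zs)
      (some ((xs.length : Int) + ys.length + 1 + 1)) none = zs := by
    have hc : ((xs.length : Int) + ys.length + 1 + 1) = ((xs.length + ys.length + 2 : Nat) : Int) := by
      push_cast; ring
    rw [hc, PySem.List.slice_from_natCast,
      show xs ++ "--" :: ys ++ "--" :: zs = (xs ++ "--" :: ys ++ ["--"]) ++ zs by simp,
      show xs.length + ys.length + 2 = (xs ++ "--" :: ys ++ ["--"]).length by simp; omega,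
      List.drop_left]
  have hne : xs ++ "--" :: ys ++ "--" :: zs ≠ [] := by simp
  have hlen : (pvSeps (xs ++ "--" :: ys ++ "--" :: zs)).length ≠ 1 := by
    rw [hsep]; simp
  simp only [parse_remaining_py, if_neg hne, hsep]
  rw [if_neg (by simp : ¬((xs.length : Int) :: ((xs.length : Int) + ys.length + 1) ::
        pvSepsFrom zs ((xs.length : Int) + ys.length + 2) = []))]
  rw [if_neg (by simp)]
  simp only [List.getD_cons_zero, List.getD_cons_succ]
  rw [hslice1, hslice2]

-- ===== VERDICT (by name: the statement is the Claim_ definition above) =====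
theorem parse_remaining_py_spec : Claim_equal_parse_remaining_py := by
  intro remaining _
  unfold Spec_parse_remaining_py
  rcases pvDecomp remaining with h | ⟨xs, ys, rfl, hx⟩
  · rw [pvA_no_sep _ h, pvB_no_sep _ h]
  · rcases pvDecomp ys with hy | ⟨as, bs, rfl, ha⟩
    · rw [pvA_one_sep xs ys hx hy, pvB_one_sep xs ys hx hy]
    · rw [show xs ++ "--" :: (as ++ "--" :: bs) = xs ++ "--" :: as ++ "--" :: bs by simp,
        pvA_two_sep xs as bs hx ha, pvB_two_sep xs as bs hx ha]
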